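-- pv_equiv track=rewrite | github.com/Aguado4/UVa-problemas | 12654 Patches.py | cic
-- ===== SOURCE A (Python) =====
-- from collections import deque
--
-- def eje(n,p1,p2,hue,mem):
--     if n in mem: ans = mem[n]
--     else:
--         if n == len(hue): ans = 0
--         else:
--             pn1,pn2 = n,n
--             while pn1 < len(hue)-1 and hue[pn1+1] <= hue[n]+p1:
--                 pn1 += 1
--             while pn2 < len(hue)-1 and hue[pn2+1] <= hue[n]+p2:
--                 pn2 += 1
--             ansp1 = eje(pn1+1,p1,p2,hue,mem) + p1
--             ansp2 = eje(pn2+1,p1,p2,hue,mem) + p2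
--             ans = min(ansp1,ansp2)
--         mem[n] = ans
--     return ans
--
-- def cic(c,p1,p2,hue):
--     min = float('inf')
--     hue = [x-hue[0] for x in hue]
--     if len(hue) > 1:
--         for i in range(len(hue)):
--             mem = dict()
--             res = eje(0,p1,p2,hue,mem)
--             if res < min: min = res
--             hue = deque(x-hue[1] for x in hue)
--             hue.append(hue.popleft()+c)
--     else:
--         mem = dict()
--         min = eje(0,p1,p2,hue,mem)
--     return int(min)
-- ===== SOURCE B (Python) =====
-- def cic(c, p1, p2, hue):
--     # Bottom-up DP (list built back-to-front) over each rotation computed by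
--     # closed-form modular indexing, instead of A's memoized recursion over
--     # deque-shifted lists.
--     n = len(hue)
--     best = None
--     for i in range(n if n > 1 else 1):
--         h = [hue[(i + j) % n] - hue[i] + (c if i + j >= n else 0) for j in range(n)]
--         dp = [0]
--         for k in range(n - 1, -1, -1):
--             r1 = k
--             while r1 < n - 1 and h[r1 + 1] <= h[k] + p1:
--                 r1 += 1
--             r2 = k
--             while r2 < n - 1 and h[r2 + 1] <= h[k] + p2:
--                 r2 += 1
--             dp.insert(0, min(dp[r1 - k] + p1, dp[r2 - k] + p2))
--         if best is None or dp[0] < best: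
--             best = dp[0]
--     return best
-- ===== Notes on version B (the rewrite author's own statement) =====
-- stated objective: alternative
-- what changed: Replaces A's top-down memoized recursion (dict memo + repeated deque-shift rotation of the position list) by a bottom-up DP list built back-to-front per rotation, with each rotation computed directly by closed-form modular indexing instead of iterated deque shifts.
import Mathlib
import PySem

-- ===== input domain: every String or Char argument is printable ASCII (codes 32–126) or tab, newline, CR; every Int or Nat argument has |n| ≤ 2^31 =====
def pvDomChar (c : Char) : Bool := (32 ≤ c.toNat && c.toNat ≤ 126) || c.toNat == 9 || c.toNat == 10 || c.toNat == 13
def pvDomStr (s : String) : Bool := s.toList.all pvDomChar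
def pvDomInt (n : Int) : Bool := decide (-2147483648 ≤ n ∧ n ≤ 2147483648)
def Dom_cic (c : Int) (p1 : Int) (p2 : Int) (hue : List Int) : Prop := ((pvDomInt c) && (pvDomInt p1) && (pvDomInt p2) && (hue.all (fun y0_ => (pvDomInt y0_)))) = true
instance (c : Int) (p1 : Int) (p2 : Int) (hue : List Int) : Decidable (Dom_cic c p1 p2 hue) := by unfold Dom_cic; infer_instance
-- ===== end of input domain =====

-- B replaces A's memoized recursion over deque-shifted lists by a bottom-up DP
-- list built back-to-front, on rotations computed by closed-form modular
-- indexing (objective: alternative structure, similar cost).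

-- ===== PORT A =====
-- the while loops of eje: advance pn while pn < len-1 and hue[pn+1] <= bound
def ejeScanA (limit : Nat) (bound : Int) (h : List Int) (pn : Nat) : Nat :=
  if pn < limit ∧ h.getD (pn + 1) 0 ≤ bound then ejeScanA limit bound h (pn + 1) else pn
termination_by limit - pn

-- eje with the memo dict threaded through; fuel only makes the recursion
-- structural (calls always have fuel ≥ len+1-n in cic, so fuel never runs out).
-- indices n, pn+1 are always in range when read (getD is exact there).
def ejeA (fuel : Nat) (n : Nat) (p1 p2 : Int) (h : List Int) (mem : PySem.Dict Int Int) : Int × PySem.Dict Int Int :=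
  match fuel with
  | 0 => (0, mem)
  | fuel + 1 =>
    match mem.get? (n : Int) with
    | some a => (a, mem)
    | none =>
      if n = h.length then (0, mem.insert (n : Int) 0)
      else
        let pn1 := ejeScanA (h.length - 1) (h.getD n 0 + p1) h n
        let pn2 := ejeScanA (h.length - 1) (h.getD n 0 + p2) h n
        let r1 := ejeA fuel (pn1 + 1) p1 p2 h mem
        let r2 := ejeA fuel (pn2 + 1) p1 p2 h r1.2
        let ans := min (r1.1 + p1) (r2.1 + p2)
        (ans, r2.2.insert (n : Int) ans)

-- float('inf') is ported as Option Int `none`: it is only ever compared with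
-- `res < min` (none always loses), no infinite arithmetic occurs, and int(min)
-- is the identity on the int result.  hue[0]/hue[1] are only evaluated inside
-- comprehensions over a nonempty hue (on [] the comprehension is empty and
-- Python never reads them), so getD is exact on every input; A is total.
def cic (c : Int) (p1 : Int) (p2 : Int) (hue : List Int) : Int :=
  let h0 := hue.map (fun x => x - hue.getD 0 0)
  if h0.length > 1 then
    let st := (List.range h0.length).foldl (fun (st : Option Int × List Int) _ =>
      let res := (ejeA (st.2.length + 1) 0 p1 p2 st.2 PySem.Dict.empty).1
      let mn : Option Int := match st.1 with
        | none => some res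
        | some m => if res < m then some res else some m
      let t := st.2.map (fun x => x - st.2.getD 1 0)
      (mn, t.tail ++ [t.headD 0 + c])) (none, h0)
    st.1.getD 0
  else (ejeA (h0.length + 1) 0 p1 p2 h0 PySem.Dict.empty).1

-- ===== PORT B =====
-- Source B's while loops are the same advance loop as eje's, so the port reuses
-- ejeScanA as the shared transliteration of that inline while.
-- dp list built back-to-front: dpB k is the dp list for indices k..n
-- (Source B's `dp.insert(0, ...)` loop read off as a recursion)
def dpB (p1 p2 : Int) (h : List Int) (k : Nat) : List Int :=
  if h.length ≤ k then [0]
  else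
    let rest := dpB p1 p2 h (k + 1)
    let r1 := ejeScanA (h.length - 1) (h.getD k 0 + p1) h k
    let r2 := ejeScanA (h.length - 1) (h.getD k 0 + p2) h k
    min (rest.getD (r1 - k) 0 + p1) (rest.getD (r2 - k) 0 + p2) :: rest
termination_by h.length - k

-- Source B's per-rotation list comprehension (closed-form modular indexing)
def rotB (c : Int) (hue : List Int) (n : Nat) (i : Nat) : List Int :=
  (List.range n).map (fun j => hue.getD ((i + j) % n) 0 - hue.getD i 0 + (if i + j ≥ n then c else 0))

-- `best = None` is ported as Option Int `none`; the loop runs ≥ 1 time so the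
-- final best is always `some`, and .getD 0 is the identity there.
def cic_alt (c : Int) (p1 : Int) (p2 : Int) (hue : List Int) : Int :=
  let n := hue.length
  let rounds := if n > 1 then n else 1
  ((List.range rounds).foldl (fun (best : Option Int) i =>
      let h := rotB c hue n i
      let dp := dpB p1 p2 h 0
      match best with
      | none => some (dp.getD 0 0)
      | some m => if dp.getD 0 0 < m then some (dp.getD 0 0) else some m) none).getD 0

-- ===== PRECONDITION & SPEC =====
def Spec_cic (c : Int) (p1 : Int) (p2 : Int) (hue : List Int) (out : Int) : Prop := out = cic_alt c p1 p2 hue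
instance (c : Int) (p1 : Int) (p2 : Int) (hue : List Int) (out : Int) : Decidable (Spec_cic c p1 p2 hue out) := by unfold Spec_cic; infer_instance

-- ===== CLAIM (what is proved, stated in full; the proofs are below) =====
def Claim_equal_cic : Prop := ∀ (c : Int) (p1 : Int) (p2 : Int) (hue : List Int), Dom_cic c p1 p2 hue → Spec_cic c p1 p2 hue (cic c p1 p2 hue)

-- ===== LEMMAS AND PROOFS =====

-- the pure value eje computes (reference spec shared by both correctness lemmas)
theorem ejeScanA_ge (limit : Nat) (bound : Int) (h : List Int) (pn : Nat) :
    pn ≤ ejeScanA limit bound h pn := by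
  fun_induction ejeScanA limit bound h pn with
  | case1 pn hc ih => omega
  | case2 pn hc => omega

theorem ejeScanA_le (limit : Nat) (bound : Int) (h : List Int) (pn : Nat) (hle : pn ≤ limit) :
    ejeScanA limit bound h pn ≤ limit := by
  fun_induction ejeScanA limit bound h pn with
  | case1 pn hc ih => exact ih (by omega)
  | case2 pn hc => omega

def Ept (p1 p2 : Int) (h : List Int) (n : Nat) : Int :=
  if _hn : h.length ≤ n then 0
  else
    min (Ept p1 p2 h (ejeScanA (h.length - 1) (h.getD n 0 + p1) h n + 1) + p1)
        (Ept p1 p2 h (ejeScanA (h.length - 1) (h.getD n 0 + p2) h n + 1) + p2)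
termination_by h.length - n
decreasing_by
  · have := ejeScanA_ge (h.length - 1) (h.getD n 0 + p1) h n; omega
  · have := ejeScanA_ge (h.length - 1) (h.getD n 0 + p2) h n; omega

def MemInv (p1 p2 : Int) (h : List Int) (mem : PySem.Dict Int Int) : Prop :=
  ∀ (k v : Int), mem.get? k = some v → ∃ m : Nat, k = (m : Int) ∧ v = Ept p1 p2 h m

theorem ejeA_correct (p1 p2 : Int) (h : List Int) :
    ∀ (fuel n : Nat) (mem : PySem.Dict Int Int), n ≤ h.length → h.length + 1 - n ≤ fuel →
      MemInv p1 p2 h mem →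
      (ejeA fuel n p1 p2 h mem).1 = Ept p1 p2 h n ∧ MemInv p1 p2 h (ejeA fuel n p1 p2 h mem).2 := by
  intro fuel
  induction fuel with
  | zero => intro n mem hn hf _; omega
  | succ fuel ih =>
    intro n mem hn hf hinv
    cases hg : mem.get? (n : Int) with
    | some a =>
      obtain ⟨m, hk, hv⟩ := hinv _ _ hg
      have hm : n = m := Nat.cast_inj.mp hk
      subst hm
      simp only [ejeA, hg]
      exact ⟨hv, hinv⟩
    | none =>
      by_cases hlen : n = h.length
      · subst hlen
        simp only [ejeA, hg, if_true]
        have he0 : Ept p1 p2 h h.length = 0 := by rw [Ept]; simp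
        refine ⟨he0.symm, ?_⟩
        intro k v hkv
        rw [PySem.Dict.get?_insert] at hkv
        split at hkv
        · rename_i hk
          exact ⟨h.length, hk, by simpa [he0] using (Option.some_inj.mp hkv).symm⟩
        · exact hinv _ _ hkv
      · have hnlt : n < h.length := lt_of_le_of_ne hn hlen
        simp only [ejeA, hg, if_neg hlen]
        set pn1 := ejeScanA (h.length - 1) (h.getD n 0 + p1) h n with hpn1
        set pn2 := ejeScanA (h.length - 1) (h.getD n 0 + p2) h n with hpn2
        have h1ge := ejeScanA_ge (h.length - 1) (h.getD n 0 + p1) h n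
        have h1le := ejeScanA_le (h.length - 1) (h.getD n 0 + p1) h n (by omega)
        have h2ge := ejeScanA_ge (h.length - 1) (h.getD n 0 + p2) h n
        have h2le := ejeScanA_le (h.length - 1) (h.getD n 0 + p2) h n (by omega)
        obtain ⟨he1, hi1⟩ := ih (pn1 + 1) mem (by omega) (by omega) hinv
        obtain ⟨he2, hi2⟩ := ih (pn2 + 1) (ejeA fuel (pn1 + 1) p1 p2 h mem).2 (by omega) (by omega) hi1
        have hEn : Ept p1 p2 h n =
            min (Ept p1 p2 h (pn1 + 1) + p1) (Ept p1 p2 h (pn2 + 1) + p2) := by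
          rw [Ept]; rw [dif_neg (by omega)]
        refine ⟨by rw [he1, he2, hEn], ?_⟩
        intro k v hkv
        rw [PySem.Dict.get?_insert] at hkv
        split at hkv
        · rename_i hk
          refine ⟨n, hk, ?_⟩
          have := (Option.some_inj.mp hkv).symm
          rw [this, he1, he2, hEn]
        · exact hi2 _ _ hkv

theorem dpB_correct (p1 p2 : Int) (h : List Int) :
    ∀ k, k ≤ h.length →
      dpB p1 p2 h k = (List.range (h.length + 1 - k)).map (fun j => Ept p1 p2 h (k + j)) := by
  intro k
  fun_induction dpB p1 p2 h k with
  | case1 k hk =>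
    intro hle
    have he : Ept p1 p2 h (k + 0) = 0 := by rw [Ept]; rw [dif_pos (by omega)]
    have h1 : h.length + 1 - k = 1 := by omega
    rw [h1, List.range_one, List.map_cons, List.map_nil, he]
  | case2 k hk rest r1 r2 ih =>
    intro hle
    have hklt : k < h.length := by omega
    simp only [r1, r2, rest]
    rw [ih (by omega)]
    have h3 : h.length + 1 - (k + 1) = h.length - k := by omega
    rw [h3]
    have h2 : h.length + 1 - k = (h.length - k) + 1 := by omega
    rw [h2, List.range_succ_eq_map, List.map_cons, List.map_map]
    have h1ge := ejeScanA_ge (h.length - 1) (h.getD k 0 + p1) h k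
    have h1le := ejeScanA_le (h.length - 1) (h.getD k 0 + p1) h k (by omega)
    have h2ge := ejeScanA_ge (h.length - 1) (h.getD k 0 + p2) h k
    have h2le := ejeScanA_le (h.length - 1) (h.getD k 0 + p2) h k (by omega)
    have hgd : ∀ r : Nat, k ≤ r → r < h.length →
        ((List.range (h.length - k)).map (fun j => Ept p1 p2 h (k + 1 + j))).getD (r - k) 0
          = Ept p1 p2 h (r + 1) := by
      intro r hr1 hr2
      rw [List.getD_eq_getElem?_getD, List.getElem?_map, List.getElem?_range (by omega)]
      simp only [Option.map_some, Option.getD_some]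
      congr 1
      omega
    rw [hgd _ h1ge (by omega), hgd _ h2ge (by omega)]
    congr 1
    · rw [show k + 0 = k from rfl]
      conv_rhs => rw [Ept]
      rw [dif_neg hk]
    · exact List.map_congr_left (fun j _ => by simp only [Function.comp]; congr 1; omega)

theorem rotB_zero (c : Int) (hue : List Int) :
    rotB c hue hue.length 0 = hue.map (fun x => x - hue.getD 0 0) := by
  apply List.ext_getElem
  · simp [rotB]
  · intro j hj1 hj2
    simp only [rotB, List.getElem_map, List.getElem_range]
    have hj : j < hue.length := by simpa [rotB] using hj1
    rw [Nat.zero_add, Nat.mod_eq_of_lt hj, if_neg (by omega), List.getD_eq_getElem hue 0 hj]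
    ring

theorem getD_map_range (f : Nat → Int) {m i : Nat} (hi : i < m) :
    ((List.range m).map f).getD i 0 = f i := by
  rw [List.getD_eq_getElem?_getD, List.getElem?_map, List.getElem?_range hi]
  rfl

theorem rotB_step (c : Int) (hue : List Int) (i : Nat) (hi : i + 1 < hue.length) :
    ((rotB c hue hue.length i).map (fun x => x - (rotB c hue hue.length i).getD 1 0)).tail ++
      [((rotB c hue hue.length i).map (fun x => x - (rotB c hue hue.length i).getD 1 0)).headD 0 + c]
      = rotB c hue hue.length (i + 1) := by
  have hn2 : 2 ≤ hue.length := by omega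
  have hlen : (rotB c hue hue.length i).length = hue.length := by simp [rotB]
  have hg1 : (rotB c hue hue.length i).getD 1 0 =
      hue.getD (i + 1) 0 - hue.getD i 0 := by
    show ((List.range hue.length).map _).getD 1 0 = _
    rw [getD_map_range _ (by omega)]
    rw [Nat.mod_eq_of_lt (by omega), if_neg (by omega)]
    ring
  apply List.ext_getElem
  · simp [rotB]
    omega
  · intro j hj1 hj2
    have hj : j < hue.length := by
      have := hj1; simp [rotB] at this; omega
    by_cases hjc : j < hue.length - 1
    · rw [List.getElem_append_left (by simp [hlen]; omega)]
      rw [List.getElem_tail]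
      simp only [List.getElem_map]
      simp only [hg1]
      simp only [rotB, List.getElem_map, List.getElem_range]
      rw [show i + (j + 1) = i + 1 + j from by omega]
      ring
    · have hj' : j = hue.length - 1 := by omega
      rw [List.getElem_append_right (by simp [hlen]; omega)]
      simp only [List.length_tail, List.length_map, hlen]
      rw [List.getElem_singleton]
      have hx : ((rotB c hue hue.length i).map
          (fun x => x - (rotB c hue hue.length i).getD 1 0)).headD 0 =
          (fun x => x - (rotB c hue hue.length i).getD 1 0)
            ((rotB c hue hue.length i).getD 0 0) := by
        have : (rotB c hue hue.length i) ≠ [] := by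
          intro hnil; rw [← hlen, hnil] at hn2; simp at hn2
        cases hcl : rotB c hue hue.length i with
        | nil => exact absurd hcl this
        | cons a l => simp [List.getD]
      rw [hx, hg1]
      have hg0 : (rotB c hue hue.length i).getD 0 0 = 0 := by
        show ((List.range hue.length).map _).getD 0 0 = _
        rw [getD_map_range _ (by omega)]
        rw [Nat.add_zero, Nat.mod_eq_of_lt (by omega), if_neg (by omega)]
        ring
      rw [hg0]
      simp only [rotB, List.getElem_map, List.getElem_range]
      have e4 : (i + 1 + j) % hue.length = i := by
        rw [hj']
        have : i + 1 + (hue.length - 1) = i + hue.length := by omega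
        rw [this, Nat.add_mod_right, Nat.mod_eq_of_lt (by omega)]
      rw [e4, if_pos (by omega)]
      ring

-- the two min-folds over rotations, paired: the A-side state carries the
-- current rotated list, the B-side recomputes it from i
theorem loop_pair (n : Nat) (upd : Option Int → Int → Option Int)
    (gA : List Int → Int) (gB : Nat → Int) (T : List Int → List Int) (rot : Nat → List Int)
    (hg : ∀ i, gA (rot i) = gB i)
    (hT : ∀ i, i + 1 < n → T (rot i) = rot (i + 1)) :
    ∀ m, m ≤ n →
      ((List.range m).foldl (fun st (_ : Nat) => (upd st.1 (gA st.2), T st.2))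
          ((none : Option Int), rot 0)).1
        = (List.range m).foldl (fun best i => upd best (gB i)) none
      ∧ (m < n → ((List.range m).foldl (fun st (_ : Nat) => (upd st.1 (gA st.2), T st.2))
          ((none : Option Int), rot 0)).2 = rot m) := by
  intro m
  induction m with
  | zero => exact fun _ => ⟨rfl, fun _ => rfl⟩
  | succ m ih =>
    intro hm
    obtain ⟨h1, h2⟩ := ih (by omega)
    have hrot := h2 (by omega)
    constructor
    · rw [List.range_succ, List.foldl_append, List.foldl_append,
        List.foldl_cons, List.foldl_nil, List.foldl_cons, List.foldl_nil, h1, hrot, hg]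
    · intro hlt
      rw [List.range_succ, List.foldl_append, List.foldl_cons, List.foldl_nil]
      show T _ = rot (m + 1)
      rw [hrot, hT m hlt]

-- ===== VERDICT (by name: the statement is the Claim_ definition above) =====
theorem cic_spec : Claim_equal_cic := by
  intro c p1 p2 hue _
  unfold Spec_cic
  have hres : ∀ h' : List Int, (ejeA (h'.length + 1) 0 p1 p2 h' PySem.Dict.empty).1 = Ept p1 p2 h' 0 := by
    intro h'
    exact (ejeA_correct p1 p2 h' (h'.length + 1) 0 PySem.Dict.empty (by omega) (by omega)
      (fun k v hkv => by rw [PySem.Dict.get?_empty] at hkv; cases hkv)).1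
  have hdp : ∀ h' : List Int, (dpB p1 p2 h' 0).getD 0 0 = Ept p1 p2 h' 0 := by
    intro h'
    rw [dpB_correct p1 p2 h' 0 (by omega), getD_map_range _ (by omega)]
  simp only [cic, cic_alt, List.length_map]
  by_cases hn1 : hue.length > 1
  · rw [if_pos hn1, if_pos hn1, ← rotB_zero c hue]
    have h := (loop_pair hue.length
      (fun mn res => match mn with
        | none => some res
        | some m => if res < m then some res else some m)
      (fun h' => (ejeA (h'.length + 1) 0 p1 p2 h' PySem.Dict.empty).1)
      (fun i => (dpB p1 p2 (rotB c hue hue.length i) 0).getD 0 0)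
      (fun h' => (h'.map (fun x => x - h'.getD 1 0)).tail ++
        [(h'.map (fun x => x - h'.getD 1 0)).headD 0 + c])
      (rotB c hue hue.length)
      (fun i => by simp only []; rw [hres, hdp])
      (fun i hi => rotB_step c hue i hi)
      hue.length le_rfl).1
    exact congrArg (fun o : Option Int => o.getD 0) h
  · rw [if_neg hn1, if_neg hn1, List.range_one, List.foldl_cons, List.foldl_nil]
    have hb := hres (hue.map (fun x => x - hue.getD 0 0))
    rw [List.length_map] at hb
    rw [hb]
    show _ = (some ((dpB p1 p2 (rotB c hue hue.length 0) 0).getD 0 0)).getD 0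
    rw [hdp, rotB_zero]
    rfl
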